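-- pv_equiv track=rewrite | github.com/adam-paul/OpenSpace | modules/base/scripts/voice/llm_service.py | clean_lua_script
-- ===== SOURCE A (Python) =====
-- def clean_lua_script(script: str) -> str:
--     """
--     Clean the generated Lua script to ensure it's pure Lua code without any markdown.
--
--     Args:
--         script: The raw script from the LLM
--
--     Returns:
--         Clean Lua code
--     """
--     # Remove any markdown code block markers
--     script = script.replace('```lua', '').replace('```', '')
--
--     # Ensure proper line endings
--     script = script.replace('\r\n', '\n').replace('\r', '\n')
--
--     # Remove any leading/trailing whitespace while preserving internal formatting
--     lines = script.split('\n')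
--     lines = [line.rstrip() for line in lines]
--
--     # Remove any empty lines at start/end while preserving internal empty lines
--     while lines and not lines[0].strip():
--         lines.pop(0)
--     while lines and not lines[-1].strip():
--         lines.pop()
--
--     # Join lines back together
--     return '\n'.join(lines)
-- ===== SOURCE B (Python) =====
-- def clean_lua_script(script: str) -> str:
--     """
--     Clean the generated Lua script: single character-level pass instead of
--     splitting into lines. A pending buffer holds whitespace not yet known to
--     be kept; it is flushed when real content arrives and discarded at the end,
--     which trims trailing whitespace per line and blank boundary lines at once.
--     """
--     script = script.replace('```lua', '').replace('```', '')
--     script = script.replace('\r\n', '\n').replace('\r', '\n')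
--     out = []
--     pending = []
--     started = False
--     for ch in script:
--         if ch == '\n':
--             while pending and pending[-1] != '\n':
--                 pending.pop()
--             pending.append('\n')
--         elif ch.isspace():
--             pending.append(ch)
--         else:
--             if started:
--                 out.extend(pending)
--             else:
--                 out.extend(c for c in pending if c != '\n')
--                 started = True
--             pending.clear()
--             out.append(ch)
--     return ''.join(out)
-- ===== Notes on version B (the rewrite author's own statement) =====
-- stated objective: alternative
-- what changed: A splits into a line list, rstrips each line, pops blank lines at both ends and rejoins; B never builds a line list: one character-level pass with a pending whitespace buffer that is flushed on content, collapsed at each newline and discarded at the end, which performs the per-line rstrip and both boundary trims at once.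
import Mathlib
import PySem

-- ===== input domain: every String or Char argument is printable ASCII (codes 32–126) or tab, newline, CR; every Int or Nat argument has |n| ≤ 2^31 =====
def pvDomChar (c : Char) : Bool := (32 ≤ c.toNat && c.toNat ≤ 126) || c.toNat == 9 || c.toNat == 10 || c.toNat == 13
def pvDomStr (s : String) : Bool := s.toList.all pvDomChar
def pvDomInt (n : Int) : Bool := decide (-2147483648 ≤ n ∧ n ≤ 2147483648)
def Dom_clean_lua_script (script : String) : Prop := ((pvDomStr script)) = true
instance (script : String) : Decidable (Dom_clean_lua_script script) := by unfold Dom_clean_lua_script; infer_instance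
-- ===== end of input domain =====

-- B replaces A's line-list pipeline (split, rstrip each line, pop blank lines at both ends, join)
-- by a single character-level pass with a pending-whitespace buffer (alternative decomposition).

-- ===== PORT A =====
-- 'while lines and not lines[0].strip(): lines.pop(0)' is the dropWhile of the blank test
def pvDropBlank (lines : List (List Char)) : List (List Char) :=
  List.dropWhile (fun l => (PySem.Chars.strip l).isEmpty) lines

def clean_lua_script (script : String) : String :=
  let s1 := PySem.Chars.replace (PySem.Chars.replace script.toList "```lua".toList []) "```".toList []
  let s2 := PySem.Chars.replace (PySem.Chars.replace s1 "\r\n".toList "\n".toList) "\r".toList "\n".toList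
  let lines0 := (PySem.Chars.splitOn s2 "\n".toList).map PySem.Chars.rstrip
  let lines1 := pvDropBlank lines0
  let lines2 := (pvDropBlank lines1.reverse).reverse
  String.ofList (PySem.Chars.join "\n".toList lines2)

-- ===== PORT B =====
-- Source B's inner "while pending and pending[-1] != '\n': pending.pop()" pops the
-- trailing non-newline characters, i.e. dropWhile (· ≠ '\n') on the reversed buffer
def pvPopNonNl (p : List Char) : List Char :=
  (p.reverse.dropWhile (fun c => c ≠ '\n')).reverse

-- one iteration of Source B's for-loop body on the state (out, pending, started)
def pvStep (st : List Char × List Char × Bool) (ch : Char) : List Char × List Char × Bool :=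
  if ch = '\n' then (st.1, pvPopNonNl st.2.1 ++ ['\n'], st.2.2)
  else if PySem.Chars.isspace ch then (st.1, st.2.1 ++ [ch], st.2.2)
  else if st.2.2 then (st.1 ++ st.2.1 ++ [ch], [], st.2.2)
  else (st.1 ++ st.2.1.filter (fun c => c ≠ '\n') ++ [ch], [], true)

def clean_lua_script_alt (script : String) : String :=
  let s1 := PySem.Str.replace (PySem.Str.replace script "```lua" "") "```" ""
  let s2 := PySem.Str.replace (PySem.Str.replace s1 "\r\n" "\n") "\r" "\n"
  String.ofList (s2.toList.foldl pvStep ([], [], false)).1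

-- ===== PRECONDITION & SPEC =====
def Spec_clean_lua_script (script : String) (out : String) : Prop := out = clean_lua_script_alt script
instance (script : String) (out : String) : Decidable (Spec_clean_lua_script script out) := by unfold Spec_clean_lua_script; infer_instance

-- ===== CLAIM (what is proved, stated in full; the proofs are below) =====
def Claim_equal_clean_lua_script : Prop := ∀ (script : String), Dom_clean_lua_script script → Spec_clean_lua_script script (clean_lua_script script)

-- ===== LEMMAS AND PROOFS =====

lemma pv_tl_nl : "\n".toList = ['\n'] := by decide

lemma pv_tl_empty : "".toList = ([] : List Char) := by decide

lemma pv_isspace_nl : PySem.Chars.isspace '\n' = true := by decide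

-- every piece produced by splitOn with a single-character separator is free of that character
lemma pv_nlfree_go (c : Char) (fuel : Nat) :
    ∀ (l cur : List Char) (acc : List (List Char)), l.length < fuel → c ∉ cur →
      (∀ x ∈ acc, c ∉ x) →
      ∀ m ∈ PySem.Chars.splitOn.go [c] fuel l cur acc, c ∉ m := by
  induction fuel with
  | zero => intro l cur acc h; omega
  | succ fuel ih =>
    intro l cur acc hlen hcur hacc m hm
    cases l with
    | nil =>
      simp [PySem.Chars.splitOn.go] at hm
      rcases hm with h | h
      · exact hacc m h
      · subst h; simpa using hcur
    | cons c' rest =>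
      by_cases hc : c = c'
      · subst hc
        rw [PySem.Chars.splitOn.go] at hm
        simp only [List.isPrefixOf, Bool.and_true, beq_self_eq_true, if_true] at hm
        refine ih rest [] (cur.reverse :: acc) (by simpa using hlen) List.not_mem_nil
          ?_ m (by simpa using hm)
        intro x hx
        rcases List.mem_cons.mp hx with h | h
        · subst h; simpa using hcur
        · exact hacc x h
      · rw [PySem.Chars.splitOn.go] at hm
        simp only [List.isPrefixOf, Bool.and_true] at hm
        rw [if_neg (by simp [hc])] at hm
        refine ih rest (c' :: cur) acc (by simpa using hlen) ?_ hacc m hm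
        intro hx
        rcases List.mem_cons.mp hx with h | h
        · exact hc h
        · exact hcur h

lemma pv_mem_splitOn_single (c : Char) (s : List Char) :
    ∀ m ∈ PySem.Chars.splitOn s [c], c ∉ m := by
  intro m hm
  exact pv_nlfree_go c (s.length + 1) s [] [] (by omega) List.not_mem_nil
    (by intro x hx; cases hx) m hm

-- intercalate unfolding lemmas
lemma pv_inter_nil (sep : List Char) : List.intercalate sep [] = [] := by
  simp [List.intercalate]

lemma pv_inter_cons (sep a : List Char) (X : List (List Char)) :
    List.intercalate sep (a :: X)
      = a ++ (if X = [] then [] else sep ++ List.intercalate sep X) := by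
  cases X with
  | nil => simp [List.intercalate, List.intersperse]
  | cons y X' => simp [List.intercalate, List.intersperse]

lemma pv_inter_append_singleton (sep y : List Char) (X : List (List Char)) :
    List.intercalate sep (X ++ [y])
      = List.intercalate sep X ++ (if X = [] then [] else sep) ++ y := by
  induction X with
  | nil => simp [List.intercalate, List.intersperse]
  | cons a X ih =>
    rw [List.cons_append, pv_inter_cons, ih, pv_inter_cons]
    cases X with
    | nil => simp [pv_inter_nil]
    | cons b X' => simp [List.append_assoc]

-- joining the pieces of splitOn with the same single-character separator rebuilds the string
lemma pv_go_join (c : Char) (fuel : Nat) :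
    ∀ (l cur : List Char) (acc : List (List Char)), l.length < fuel →
      List.intercalate [c] (PySem.Chars.splitOn.go [c] fuel l cur acc)
        = List.intercalate [c] acc.reverse ++ (if acc = [] then [] else [c])
            ++ cur.reverse ++ l := by
  induction fuel with
  | zero => intro l cur acc h; omega
  | succ fuel ih =>
    intro l cur acc hlen
    cases l with
    | nil =>
      show List.intercalate [c] ((cur.reverse :: acc).reverse) = _
      rw [List.reverse_cons, pv_inter_append_singleton]
      simp
    | cons c' rest =>
      by_cases hc : c = c'
      · subst hc
        rw [PySem.Chars.splitOn.go]
        simp only [List.isPrefixOf, Bool.and_true, beq_self_eq_true, if_true]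
        have h1 := ih rest [] (cur.reverse :: acc) (by simpa using hlen)
        simp only [List.length_cons] at h1 ⊢
        simp only [List.length_nil, Nat.zero_add, List.drop_succ_cons, List.drop_zero]
        rw [h1, List.reverse_cons, pv_inter_append_singleton]
        simp [List.append_assoc]
      · rw [PySem.Chars.splitOn.go]
        simp only [List.isPrefixOf, Bool.and_true]
        rw [if_neg (by simp [hc]), ih rest (c' :: cur) acc (by simpa using hlen)]
        simp [List.append_assoc]

lemma pv_join_splitOn (c : Char) (s : List Char) :
    List.intercalate [c] (PySem.Chars.splitOn s [c]) = s := by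
  unfold PySem.Chars.splitOn
  rw [pv_go_join c (s.length + 1) s [] [] (by omega)]
  simp [pv_inter_nil]

lemma pv_inter_eq_flatMap (c : Char) (x : List Char) (X : List (List Char)) :
    List.intercalate [c] (x :: X) = x ++ X.flatMap (fun l => c :: l) := by
  induction X generalizing x with
  | nil => simp [List.intercalate, List.intersperse]
  | cons y X' ih =>
    rw [pv_inter_cons, if_neg (by simp), ih y]
    simp

-- rstrip / trailing-whitespace toolkit
lemma pv_rstrip_nil_iff (m : List Char) :
    PySem.Chars.rstrip m = [] ↔ ∀ x ∈ m, PySem.Chars.isspace x = true := by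
  unfold PySem.Chars.rstrip
  rw [List.reverse_eq_nil_iff, List.dropWhile_eq_nil_iff]
  constructor
  · intro h x hx; exact h x (List.mem_reverse.mpr hx)
  · intro h x hx; exact h x (List.mem_reverse.mp hx)

def pvTws (m : List Char) : List Char := (m.reverse.takeWhile PySem.Chars.isspace).reverse

lemma pv_takeWhile_append {α : Type} (p : α → Bool) (l₁ l₂ : List α) :
    (l₁ ++ l₂).takeWhile p
      = if l₁.all p then l₁ ++ l₂.takeWhile p else l₁.takeWhile p := by
  induction l₁ with
  | nil => simp
  | cons a l ih =>
    by_cases h : p a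
    · simp [h, ih]
      split_ifs <;> simp
    · simp [h]

lemma pv_rstrip_cons_of_ne (c : Char) (m : List Char) (h : PySem.Chars.rstrip m ≠ []) :
    PySem.Chars.rstrip (c :: m) = c :: PySem.Chars.rstrip m := by
  unfold PySem.Chars.rstrip at *
  rw [List.reverse_cons, List.dropWhile_append]
  have h' : ¬(List.dropWhile PySem.Chars.isspace m.reverse).isEmpty := by
    intro hE; exact h (by rw [List.isEmpty_iff] at hE; rw [hE]; simp)
  rw [if_neg h']
  simp

lemma pv_rstrip_cons_content (c : Char) (m : List Char)
    (hc : PySem.Chars.isspace c = false) (h : PySem.Chars.rstrip m = []) :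
    PySem.Chars.rstrip (c :: m) = [c] := by
  unfold PySem.Chars.rstrip at *
  rw [List.reverse_cons, List.dropWhile_append]
  have h' : (List.dropWhile PySem.Chars.isspace m.reverse).isEmpty := by
    rw [List.reverse_eq_nil_iff] at h; simp [h]
  rw [if_pos h']
  simp [hc]

lemma pv_tws_cons_of_ne (c : Char) (m : List Char) (h : PySem.Chars.rstrip m ≠ []) :
    pvTws (c :: m) = pvTws m := by
  have hall : ¬ (m.reverse.all PySem.Chars.isspace = true) := by
    intro hall
    apply h
    unfold PySem.Chars.rstrip
    rw [List.dropWhile_eq_nil_iff.mpr (by intro x hx; exact List.all_eq_true.mp hall x hx)]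
    simp
  unfold pvTws
  rw [List.reverse_cons, pv_takeWhile_append, if_neg hall]

lemma pv_tws_cons_content (c : Char) (m : List Char)
    (hc : PySem.Chars.isspace c = false) (h : PySem.Chars.rstrip m = []) :
    pvTws (c :: m) = m := by
  unfold pvTws
  rw [List.reverse_cons, pv_takeWhile_append]
  have hall : m.reverse.all PySem.Chars.isspace := by
    rw [List.all_eq_true]
    intro x hx
    exact (pv_rstrip_nil_iff m).mp h x (List.mem_reverse.mp hx)
  rw [if_pos hall]
  simp [hc]

lemma pv_mem_tws {a : Char} {m : List Char} (h : a ∈ pvTws m) : a ∈ m := by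
  unfold pvTws at h
  rw [List.mem_reverse] at h
  have := (List.takeWhile_sublist (l := m.reverse) (p := PySem.Chars.isspace)).subset h
  simpa using this

-- the while/pop loop on a buffer of the shape (newlines ++ newline-free) pops exactly the tail
lemma pv_pop_shape (k : Nat) (w : List Char) (hw : '\n' ∉ w) :
    pvPopNonNl (List.replicate k '\n' ++ w) = List.replicate k '\n' := by
  unfold pvPopNonNl
  rw [List.reverse_append, List.reverse_replicate, List.dropWhile_append]
  have h1 : List.dropWhile (fun c => c ≠ '\n') w.reverse = [] := by
    rw [List.dropWhile_eq_nil_iff]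
    intro x hx
    have hxm : x ∈ w := List.mem_reverse.mp hx
    simp only [ne_eq, decide_eq_true_eq]
    exact fun hxe => hw (hxe ▸ hxm)
  rw [if_pos (List.isEmpty_iff.mpr h1)]
  have h2 : List.dropWhile (fun c => decide (c ≠ '\n')) (List.replicate k '\n')
      = List.replicate k '\n' := by
    cases k with
    | zero => simp
    | succ k' => rw [List.replicate_succ, List.dropWhile_cons, if_neg (by simp)]
  rw [h2, List.reverse_replicate]

-- step lemmas
lemma pv_step_nl (st : List Char × List Char × Bool) :
    pvStep st '\n' = (st.1, pvPopNonNl st.2.1 ++ ['\n'], st.2.2) := by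
  simp [pvStep]

lemma pv_step_ws {c : Char} (h1 : c ≠ '\n') (h2 : PySem.Chars.isspace c = true)
    (st : List Char × List Char × Bool) :
    pvStep st c = (st.1, st.2.1 ++ [c], st.2.2) := by
  simp [pvStep, h1, h2]

lemma pv_step_content_true {c : Char} (h2 : PySem.Chars.isspace c = false)
    (out p : List Char) :
    pvStep (out, p, true) c = (out ++ p ++ [c], [], true) := by
  have h1 : c ≠ '\n' := by intro h; rw [h] at h2; exact absurd pv_isspace_nl (by simp [h2])
  simp [pvStep, h1, h2]

lemma pv_step_content_false {c : Char} (h2 : PySem.Chars.isspace c = false)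
    (out p : List Char) :
    pvStep (out, p, false) c = (out ++ p.filter (fun c => c ≠ '\n') ++ [c], [], true) := by
  have h1 : c ≠ '\n' := by intro h; rw [h] at h2; exact absurd pv_isspace_nl (by simp [h2])
  simp [pvStep, h1, h2]

-- folding over an all-whitespace newline-free line only grows the pending buffer
lemma pv_fold_blank (m : List Char) (hnl : '\n' ∉ m)
    (hws : ∀ x ∈ m, PySem.Chars.isspace x = true) (st : List Char × List Char × Bool) :
    List.foldl pvStep st m = (st.1, st.2.1 ++ m, st.2.2) := by
  induction m generalizing st with
  | nil => simp
  | cons c m' ih =>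
    have hc1 : c ≠ '\n' := fun h => hnl (by simp [h])
    have hc2 := hws c (by simp)
    rw [List.foldl_cons, pv_step_ws hc1 hc2,
      ih (fun h => hnl (by simp [h])) (fun x hx => hws x (by simp [hx]))]
    simp

-- folding over a newline-free line with content, started = true
lemma pv_fold_content_true (m : List Char) (hnl : '\n' ∉ m)
    (h : PySem.Chars.rstrip m ≠ []) (out p : List Char) :
    List.foldl pvStep (out, p, true) m = (out ++ p ++ PySem.Chars.rstrip m, pvTws m, true) := by
  induction m generalizing out p with
  | nil => exact absurd (by unfold PySem.Chars.rstrip; simp) h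
  | cons c m' ih =>
    have hnl' : '\n' ∉ m' := fun hx => hnl (by simp [hx])
    by_cases hc : PySem.Chars.isspace c = true
    · have hc1 : c ≠ '\n' := fun hce => hnl (by simp [hce])
      have hm' : PySem.Chars.rstrip m' ≠ [] := by
        intro hE
        exact h ((pv_rstrip_nil_iff _).mpr (by
          intro x hx
          rcases List.mem_cons.mp hx with h' | h'
          · rw [h']; exact hc
          · exact (pv_rstrip_nil_iff m').mp hE x h'))
      rw [List.foldl_cons, pv_step_ws hc1 hc, ih hnl' hm',
        pv_rstrip_cons_of_ne c m' hm', pv_tws_cons_of_ne c m' hm']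
      simp
    · rw [Bool.not_eq_true] at hc
      rw [List.foldl_cons, pv_step_content_true hc]
      by_cases hm' : PySem.Chars.rstrip m' = []
      · rw [pv_fold_blank m' hnl' ((pv_rstrip_nil_iff m').mp hm'),
          pv_rstrip_cons_content c m' hc hm', pv_tws_cons_content c m' hc hm']
        simp
      · rw [ih hnl' hm', pv_rstrip_cons_of_ne c m' hm', pv_tws_cons_of_ne c m' hm']
        simp

-- folding over a newline-free line with content, started = false: pending is filtered
lemma pv_fold_content_false (m : List Char) (hnl : '\n' ∉ m)
    (h : PySem.Chars.rstrip m ≠ []) (out p : List Char) :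
    List.foldl pvStep (out, p, false) m
      = (out ++ p.filter (fun c => c ≠ '\n') ++ PySem.Chars.rstrip m, pvTws m, true) := by
  induction m generalizing out p with
  | nil => exact absurd (by unfold PySem.Chars.rstrip; simp) h
  | cons c m' ih =>
    have hnl' : '\n' ∉ m' := fun hx => hnl (by simp [hx])
    by_cases hc : PySem.Chars.isspace c = true
    · have hc1 : c ≠ '\n' := fun hce => hnl (by simp [hce])
      have hm' : PySem.Chars.rstrip m' ≠ [] := by
        intro hE
        exact h ((pv_rstrip_nil_iff _).mpr (by
          intro x hx
          rcases List.mem_cons.mp hx with h' | h'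
          · rw [h']; exact hc
          · exact (pv_rstrip_nil_iff m').mp hE x h'))
      rw [List.foldl_cons, pv_step_ws hc1 hc, ih hnl' hm',
        pv_rstrip_cons_of_ne c m' hm', pv_tws_cons_of_ne c m' hm']
      have : (p ++ [c]).filter (fun c => decide (c ≠ '\n'))
          = p.filter (fun c => decide (c ≠ '\n')) ++ [c] := by
        rw [List.filter_append]
        simp [hc1]
      rw [this]
      simp
    · rw [Bool.not_eq_true] at hc
      rw [List.foldl_cons, pv_step_content_false hc]
      by_cases hm' : PySem.Chars.rstrip m' = []
      · rw [pv_fold_blank m' hnl' ((pv_rstrip_nil_iff m').mp hm'),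
          pv_rstrip_cons_content c m' hc hm', pv_tws_cons_content c m' hc hm']
        simp
      · rw [pv_fold_content_true m' hnl' hm',
          pv_rstrip_cons_of_ne c m' hm', pv_tws_cons_of_ne c m' hm']
        simp

-- trailing-blank trim on the rstripped-lines level (matches A's second while loop)
def pvEL (X : List (List Char)) : List (List Char) :=
  (X.reverse.dropWhile (fun l => l.isEmpty)).reverse

def pvTA (X : List (List Char)) : List (List Char) :=
  pvEL (X.dropWhile (fun l => l.isEmpty))

lemma pv_EL_cons_nil (X : List (List Char)) :
    pvEL ([] :: X) = if pvEL X = [] then [] else [] :: pvEL X := by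
  unfold pvEL
  rw [List.reverse_cons, List.dropWhile_append]
  by_cases h : (X.reverse.dropWhile (fun l => l.isEmpty)) = []
  · rw [if_pos (by simp [h]), if_pos (by simp [h])]
    simp
  · rw [if_neg (by simp [h]), if_neg (by simp [h])]
    simp

lemma pv_EL_cons_ne (a : List Char) (X : List (List Char)) (ha : a ≠ []) :
    pvEL (a :: X) = a :: pvEL X := by
  unfold pvEL
  rw [List.reverse_cons, List.dropWhile_append]
  by_cases h : (X.reverse.dropWhile (fun l => l.isEmpty)) = []
  · rw [if_pos (by simp [h])]
    simp [List.isEmpty_iff, ha, h]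
  · rw [if_neg (by simp [h])]
    simp

lemma pv_TA_cons_nil (X : List (List Char)) : pvTA ([] :: X) = pvTA X := by
  unfold pvTA
  simp

lemma pv_TA_cons_ne (a : List Char) (X : List (List Char)) (ha : a ≠ []) :
    pvTA (a :: X) = a :: pvEL X := by
  unfold pvTA
  rw [List.dropWhile_cons, if_neg (by simp [List.isEmpty_iff, ha]),
    pv_EL_cons_ne a X ha]

-- the started-true phase across the remaining '\n'-prefixed lines
lemma pv_fold_rest_true (M : List (List Char)) (hnl : ∀ m ∈ M, '\n' ∉ m) :
    ∀ (out : List Char) (k : Nat) (w : List Char), '\n' ∉ w →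
      ∃ p', List.foldl pvStep (out, List.replicate k '\n' ++ w, true)
              (M.flatMap (fun l => '\n' :: l))
        = (out ++ (if pvEL (M.map PySem.Chars.rstrip) = [] then []
              else List.replicate k '\n' ++ ['\n']
                ++ List.intercalate ['\n'] (pvEL (M.map PySem.Chars.rstrip))), p', true) := by
  induction M with
  | nil =>
    intro out k w hw
    refine ⟨List.replicate k '\n' ++ w, ?_⟩
    simp [pvEL]
  | cons m M' ih =>
    intro out k w hw
    have hm := hnl m (by simp)
    have hnl' : ∀ x ∈ M', '\n' ∉ x := fun x hx => hnl x (by simp [hx])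
    rw [List.flatMap_cons, List.cons_append, List.foldl_cons, pv_step_nl]
    simp only
    rw [pv_pop_shape k w hw, ← List.replicate_succ' (n := k), List.foldl_append]
    by_cases hb : PySem.Chars.rstrip m = []
    · rw [pv_fold_blank m hm ((pv_rstrip_nil_iff m).mp hb)]
      simp only
      obtain ⟨p', hp'⟩ := ih hnl' out (k + 1) m hm
      refine ⟨p', ?_⟩
      rw [hp']
      rw [List.map_cons, hb, pv_EL_cons_nil]
      by_cases hE : pvEL (M'.map PySem.Chars.rstrip) = []
      · simp [hE]
      · rw [if_neg hE, if_neg hE, if_neg (by simp), pv_inter_cons, if_neg hE,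
          List.replicate_succ' (n := k)]
        simp [List.append_assoc]
    · rw [pv_fold_content_true m hm hb]
      have hwt : '\n' ∉ pvTws m := fun hx => hm (pv_mem_tws hx)
      obtain ⟨p', hp'⟩ := ih hnl' (out ++ List.replicate (k + 1) '\n' ++ PySem.Chars.rstrip m) 0 (pvTws m) hwt
      refine ⟨p', ?_⟩
      rw [show (List.replicate 0 '\n' ++ pvTws m) = pvTws m by simp] at hp'
      rw [hp', List.map_cons, pv_EL_cons_ne _ _ hb, if_neg (List.cons_ne_nil _ _),
        pv_inter_cons]
      by_cases hE : pvEL (M'.map PySem.Chars.rstrip) = []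
      · rw [if_pos hE, if_pos hE, List.replicate_succ' (n := k)]
        simp [List.append_assoc]
      · rw [if_neg hE, if_neg hE, List.replicate_succ' (n := k)]
        simp [List.append_assoc]

-- the leading (started = false) phase across '\n'-prefixed lines
lemma pv_fold_rest_false (M : List (List Char)) (hnl : ∀ m ∈ M, '\n' ∉ m) :
    ∀ (out : List Char) (k : Nat) (w : List Char), '\n' ∉ w →
      ∃ p' b', List.foldl pvStep (out, List.replicate k '\n' ++ w, false)
              (M.flatMap (fun l => '\n' :: l))
        = (out ++ List.intercalate ['\n'] (pvTA (M.map PySem.Chars.rstrip)), p', b') := by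
  induction M with
  | nil =>
    intro out k w hw
    refine ⟨List.replicate k '\n' ++ w, false, ?_⟩
    simp [pvTA, pvEL, List.intercalate]
  | cons m M' ih =>
    intro out k w hw
    have hm := hnl m (by simp)
    have hnl' : ∀ x ∈ M', '\n' ∉ x := fun x hx => hnl x (by simp [hx])
    rw [List.flatMap_cons, List.cons_append, List.foldl_cons, pv_step_nl]
    simp only
    rw [pv_pop_shape k w hw, ← List.replicate_succ' (n := k), List.foldl_append]
    by_cases hb : PySem.Chars.rstrip m = []
    · rw [pv_fold_blank m hm ((pv_rstrip_nil_iff m).mp hb)]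
      simp only
      obtain ⟨p', b', hp'⟩ := ih hnl' out (k + 1) m hm
      exact ⟨p', b', by rw [hp', List.map_cons, hb, pv_TA_cons_nil]⟩
    · rw [pv_fold_content_false m hm hb]
      have hfil : (List.replicate (k + 1) '\n').filter (fun c => decide (c ≠ '\n')) = [] := by
        simp
      rw [hfil]
      have hwt : '\n' ∉ pvTws m := fun hx => hm (pv_mem_tws hx)
      obtain ⟨p', hp'⟩ := pv_fold_rest_true M' hnl'
        (out ++ ([] : List Char) ++ PySem.Chars.rstrip m) 0 (pvTws m) hwt
      refine ⟨p', true, ?_⟩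
      rw [show (List.replicate 0 '\n' ++ pvTws m) = pvTws m by simp] at hp'
      rw [hp', List.map_cons, pv_TA_cons_ne _ _ hb, pv_inter_cons]
      by_cases hE : pvEL (M'.map PySem.Chars.rstrip) = []
      · rw [if_pos hE, if_pos hE]
        simp
      · rw [if_neg hE, if_neg hE]
        simp

-- A-side: pvDropBlank is dropWhile isEmpty on rstripped lines
lemma pv_dropWhile_congr {α : Type} {p q : α → Bool} {l : List α}
    (h : ∀ x ∈ l, p x = q x) : List.dropWhile p l = List.dropWhile q l := by
  induction l with
  | nil => simp
  | cons a l ih =>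
    have ha := h a (by simp)
    by_cases hp : p a
    · simp [hp, ← ha, ih fun x hx => h x (by simp [hx])]
    · simp [hp, ← ha]

lemma pv_dropWhile_idem {α : Type} (p : α → Bool) (l : List α) :
    List.dropWhile p (List.dropWhile p l) = List.dropWhile p l := by
  induction l with
  | nil => simp
  | cons a l ih =>
    by_cases h : p a
    · simp [h, ih]
    · simp [h]

lemma pv_rstrip_idem (m : List Char) :
    PySem.Chars.rstrip (PySem.Chars.rstrip m) = PySem.Chars.rstrip m := by
  unfold PySem.Chars.rstrip
  rw [List.reverse_reverse, pv_dropWhile_idem]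

lemma pv_strip_isEmpty {l : List Char} (h : PySem.Chars.rstrip l = l) :
    (PySem.Chars.strip l).isEmpty = l.isEmpty := by
  unfold PySem.Chars.strip PySem.Chars.lstrip PySem.Chars.rstrip
  rcases hE : l.isEmpty with _ | _
  · rw [List.isEmpty_eq_false_iff] at hE
    by_cases hws : ∀ x ∈ l, PySem.Chars.isspace x = true
    · exfalso
      have : PySem.Chars.rstrip l = [] := by
        unfold PySem.Chars.rstrip
        rw [List.dropWhile_eq_nil_iff.mpr (by intro x hx; exact hws x (List.mem_reverse.mp hx))]
        simp
      exact hE (by rw [← h, this])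
    · obtain ⟨x, hx, hxs⟩ : ∃ x ∈ l, ¬PySem.Chars.isspace x = true := by
        simpa using hws
      rw [List.isEmpty_eq_false_iff]
      intro hnil
      rw [List.reverse_eq_nil_iff] at hnil
      have h1 : ∀ y ∈ List.dropWhile PySem.Chars.isspace l, PySem.Chars.isspace y = true := by
        intro y hy
        exact List.dropWhile_eq_nil_iff.mp hnil y (List.mem_reverse.mpr hy)
      have h2 : ∀ y ∈ l, PySem.Chars.isspace y = true := by
        intro y hy
        rw [← List.takeWhile_append_dropWhile (p := PySem.Chars.isspace) (l := l)] at hy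
        rcases List.mem_append.mp hy with h' | h'
        · exact List.mem_takeWhile_imp h'
        · exact h1 y h'
      exact absurd (h2 x hx) (by simp [hxs])
  · rw [List.isEmpty_iff] at hE; subst hE; simp

lemma pv_dropBlank_eq {L : List (List Char)} (h : ∀ l ∈ L, PySem.Chars.rstrip l = l) :
    pvDropBlank L = List.dropWhile (fun l => l.isEmpty) L := by
  unfold pvDropBlank
  exact pv_dropWhile_congr fun l hl => pv_strip_isEmpty (h l hl)

-- A's two boundary loops compute pvTA on the rstripped lines
lemma pv_A_trim (L : List (List Char)) :
    (pvDropBlank ((pvDropBlank (L.map PySem.Chars.rstrip)).reverse)).reverse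
      = pvTA (L.map PySem.Chars.rstrip) := by
  have hfix : ∀ l ∈ L.map PySem.Chars.rstrip, PySem.Chars.rstrip l = l := by
    intro l hl
    obtain ⟨m, _, rfl⟩ := List.mem_map.mp hl
    exact pv_rstrip_idem m
  rw [pv_dropBlank_eq hfix]
  have hfix2 : ∀ l ∈ (List.dropWhile (fun l => l.isEmpty) (L.map PySem.Chars.rstrip)).reverse,
      PySem.Chars.rstrip l = l := by
    intro l hl
    rw [List.mem_reverse] at hl
    exact hfix l ((List.dropWhile_sublist _).subset hl)
  rw [pv_dropBlank_eq hfix2]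
  rfl

-- ===== VERDICT (by name: the statement is the Claim_ definition above) =====
theorem clean_lua_script_spec : Claim_equal_clean_lua_script := by
  intro script _
  show clean_lua_script script = clean_lua_script_alt script
  simp only [clean_lua_script, clean_lua_script_alt]
  set S2 : String := PySem.Str.replace (PySem.Str.replace
      (PySem.Str.replace (PySem.Str.replace script "```lua" "") "```" "") "\r\n" "\n") "\r" "\n" with hS2
  have hchars : S2.toList = PySem.Chars.replace (PySem.Chars.replace
      (PySem.Chars.replace (PySem.Chars.replace script.toList "```lua".toList [])
        "```".toList []) "\r\n".toList "\n".toList) "\r".toList "\n".toList := by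
    rw [hS2]; simp only [PySem.Str.toList_replace, pv_tl_empty]
  rw [← hchars, pv_tl_nl]
  -- A side: the two boundary loops are pvTA
  rw [pv_A_trim (PySem.Chars.splitOn S2.toList ['\n'])]
  -- B side: fold over the string = fold over the joined split pieces
  have hnlL : ∀ m ∈ PySem.Chars.splitOn S2.toList ['\n'], '\n' ∉ m :=
    pv_mem_splitOn_single '\n' S2.toList
  have hjoin := pv_join_splitOn '\n' S2.toList
  cases hL : PySem.Chars.splitOn S2.toList ['\n'] with
  | nil =>
    rw [hL] at hjoin
    rw [pv_inter_nil] at hjoin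
    rw [← hjoin]
    simp [pvTA, pvEL, PySem.Chars.join, List.intercalate]
  | cons l0 rest =>
    rw [hL] at hjoin hnlL
    rw [← hjoin, pv_inter_eq_flatMap, List.foldl_append]
    have hl0 : '\n' ∉ l0 := hnlL l0 (by simp)
    have hrest : ∀ m ∈ rest, '\n' ∉ m := fun m hm => hnlL m (by simp [hm])
    by_cases hb : PySem.Chars.rstrip l0 = []
    · rw [pv_fold_blank l0 hl0 ((pv_rstrip_nil_iff l0).mp hb)]
      simp only
      obtain ⟨p', b', hp'⟩ := pv_fold_rest_false rest hrest [] 0 l0 hl0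
      rw [show (List.replicate 0 '\n' ++ l0) = l0 by simp] at hp'
      rw [show (([] : List Char), l0, false) = (([] : List Char), ([] : List Char) ++ l0, false) by simp] at hp'
      rw [hp', List.map_cons, hb, pv_TA_cons_nil]
      simp [PySem.Chars.join]
    · rw [pv_fold_content_false l0 hl0 hb]
      have hwt : '\n' ∉ pvTws l0 := fun hx => hl0 (pv_mem_tws hx)
      obtain ⟨p', hp'⟩ := pv_fold_rest_true rest hrest
        (([] : List Char) ++ List.filter (fun c => decide (c ≠ '\n')) [] ++ PySem.Chars.rstrip l0) 0 (pvTws l0) hwt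
      rw [show (List.replicate 0 '\n' ++ pvTws l0) = pvTws l0 by simp] at hp'
      rw [hp', List.map_cons, pv_TA_cons_ne _ _ hb]
      rw [show PySem.Chars.join ['\n'] (PySem.Chars.rstrip l0 :: pvEL (rest.map PySem.Chars.rstrip))
          = List.intercalate ['\n'] (PySem.Chars.rstrip l0 :: pvEL (rest.map PySem.Chars.rstrip)) from rfl,
        pv_inter_cons]
      by_cases hE : pvEL (rest.map PySem.Chars.rstrip) = []
      · rw [if_pos hE, if_pos hE]
        simp
      · rw [if_neg hE, if_neg hE]
        simp
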